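-- pv_equiv track=rewrite | github.com/alansberman/film_tracker | films/film_helper.py | parse_top_credits
-- ===== SOURCE A (Python) =====
-- def parse_top_credits(credits):
--     top_credits = {
--         'directors': [item for item in credits if item['job'] == 'Director'],
--         'producers': [item for item in credits if item['job'] == 'Producer'],
--         'screenwriters': [item for item in credits if item['job'] == 'Screenplay'],
--         'story': [item for item in credits if item['job'] == 'Story'],
--         'editors': [item for item in credits if item['job'] == 'Editor'],
--         'composers': [item for item in credits if item['job'] == 'Original Music Composer'],
--         'photographers': [item for item in credits if item['job'] == 'Director of Photography']
--     }
--     return top_credits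
-- ===== SOURCE B (Python) =====
-- def parse_top_credits(credits):
--     result = {
--         'directors': [], 'producers': [], 'screenwriters': [], 'story': [],
--         'editors': [], 'composers': [], 'photographers': []
--     }
--     dispatch = {
--         'Director': 'directors', 'Producer': 'producers',
--         'Screenplay': 'screenwriters', 'Story': 'story', 'Editor': 'editors',
--         'Original Music Composer': 'composers',
--         'Director of Photography': 'photographers'
--     }
--     for item in credits:
--         key = dispatch.get(item['job'])
--         if key is not None:
--             result[key].append(item)
--     return result
-- ===== Notes on version B (the rewrite author's own statement) =====
-- stated objective: faster
-- what changed: Replaces seven separate filtering passes over the credits list (one comprehension per category) with a single pass that dispatches each item to its category via a job->category lookup table.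
import Mathlib
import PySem

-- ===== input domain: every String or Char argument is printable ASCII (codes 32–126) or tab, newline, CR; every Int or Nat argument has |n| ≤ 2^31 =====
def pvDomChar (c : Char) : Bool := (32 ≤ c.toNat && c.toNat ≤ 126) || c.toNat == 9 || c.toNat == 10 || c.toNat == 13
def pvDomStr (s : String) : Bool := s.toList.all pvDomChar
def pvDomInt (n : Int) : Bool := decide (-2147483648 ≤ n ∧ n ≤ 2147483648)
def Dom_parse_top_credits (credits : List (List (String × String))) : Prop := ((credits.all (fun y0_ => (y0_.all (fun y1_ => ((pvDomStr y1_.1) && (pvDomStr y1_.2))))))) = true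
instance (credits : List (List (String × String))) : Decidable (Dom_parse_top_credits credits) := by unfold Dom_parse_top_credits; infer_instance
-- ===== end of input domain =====

-- B groups the credits in ONE pass with a job->category dispatch table instead of A's seven filtering passes.

-- ===== PORT A =====
-- item['job'] (raises KeyError when absent; those inputs are outside Pre_) ported as first-match lookup
def pvJob? (item : List (String × String)) : Option String := (PySem.Dict.mk item).get? "job"

def parse_top_credits (credits : List (List (String × String))) : List (String × List (List (String × String))) :=
  [ ("directors",     credits.filter (fun item => pvJob? item == some "Director")),
    ("producers",     credits.filter (fun item => pvJob? item == some "Producer")),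
    ("screenwriters", credits.filter (fun item => pvJob? item == some "Screenplay")),
    ("story",         credits.filter (fun item => pvJob? item == some "Story")),
    ("editors",       credits.filter (fun item => pvJob? item == some "Editor")),
    ("composers",     credits.filter (fun item => pvJob? item == some "Original Music Composer")),
    ("photographers", credits.filter (fun item => pvJob? item == some "Director of Photography")) ]

-- ===== PORT B =====
def pvDispatch : List (String × String) :=
  [ ("Director", "directors"), ("Producer", "producers"), ("Screenplay", "screenwriters"),
    ("Story", "story"), ("Editor", "editors"), ("Original Music Composer", "composers"),
    ("Director of Photography", "photographers") ]

-- one loop iteration: key = dispatch.get(item['job']); if key is not None: result[key].append(item)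
-- (item['job'] raises KeyError when absent — outside Pre_; the none branch is that unreachable case)
def pvStep (st : List (String × List (List (String × String)))) (item : List (String × String)) :
    List (String × List (List (String × String))) :=
  match (PySem.Dict.mk item).get? "job" with
  | none => st
  | some j =>
    match (PySem.Dict.mk pvDispatch).get? j with
    | none => st
    | some k => st.map (fun p => if p.1 == k then (p.1, p.2 ++ [item]) else p)

def parse_top_credits_alt (credits : List (List (String × String))) : List (String × List (List (String × String))) :=
  credits.foldl pvStep
    [ ("directors", []), ("producers", []), ("screenwriters", []), ("story", []),
      ("editors", []), ("composers", []), ("photographers", []) ]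

-- ===== PRECONDITION & SPEC =====
-- Pre_ excludes exactly the inputs on which A raises KeyError: an item without a 'job' key.
def Pre_parse_top_credits (credits : List (List (String × String))) : Prop :=
  (credits.all (fun item => (PySem.Dict.mk item).contains "job")) = true
instance (credits : List (List (String × String))) : Decidable (Pre_parse_top_credits credits) := by unfold Pre_parse_top_credits; infer_instance

def pvWitness_parse_top_credits : (List (List (String × String))) :=
  [[("job", "Director"), ("name", "Ava")], [("job", "Editor"), ("name", "Bo")]]

def Spec_parse_top_credits (credits : List (List (String × String))) (out : List (String × List (List (String × String)))) : Prop := out = parse_top_credits_alt credits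
instance (credits : List (List (String × String))) (out : List (String × List (List (String × String)))) : Decidable (Spec_parse_top_credits credits out) := by unfold Spec_parse_top_credits; infer_instance

-- ===== CLAIM (what is proved, stated in full; the proofs are below) =====
def Claim_equal_parse_top_credits : Prop := ∀ (credits : List (List (String × String))), Dom_parse_top_credits credits → Pre_parse_top_credits credits → Spec_parse_top_credits credits (parse_top_credits credits)
-- ===== LEMMAS AND PROOFS =====

-- loop invariant: one pass through pvStep from any 7-list state appends exactly the filtered items
theorem pvFold_char (credits : List (List (String × String)))
    (l1 l2 l3 l4 l5 l6 l7 : List (List (String × String))) :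
    credits.foldl pvStep
      [ ("directors", l1), ("producers", l2), ("screenwriters", l3), ("story", l4),
        ("editors", l5), ("composers", l6), ("photographers", l7) ]
    = [ ("directors",     l1 ++ credits.filter (fun item => pvJob? item == some "Director")),
        ("producers",     l2 ++ credits.filter (fun item => pvJob? item == some "Producer")),
        ("screenwriters", l3 ++ credits.filter (fun item => pvJob? item == some "Screenplay")),
        ("story",         l4 ++ credits.filter (fun item => pvJob? item == some "Story")),
        ("editors",       l5 ++ credits.filter (fun item => pvJob? item == some "Editor")),
        ("composers",     l6 ++ credits.filter (fun item => pvJob? item == some "Original Music Composer")),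
        ("photographers", l7 ++ credits.filter (fun item => pvJob? item == some "Director of Photography")) ] := by
  induction credits generalizing l1 l2 l3 l4 l5 l6 l7 with
  | nil => simp
  | cons i rest ih =>
    rw [List.foldl_cons]
    rcases hj : (PySem.Dict.mk i).get? "job" with _ | j
    · have hstep : pvStep
        [ ("directors", l1), ("producers", l2), ("screenwriters", l3), ("story", l4),
          ("editors", l5), ("composers", l6), ("photographers", l7) ] i
        = [ ("directors", l1), ("producers", l2), ("screenwriters", l3), ("story", l4),
            ("editors", l5), ("composers", l6), ("photographers", l7) ] := by
        simp [pvStep, hj]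
      rw [hstep, ih]
      simp [pvJob?, hj]
    · by_cases h1 : j = "Director"
      · subst h1
        have hstep : pvStep
          [ ("directors", l1), ("producers", l2), ("screenwriters", l3), ("story", l4),
            ("editors", l5), ("composers", l6), ("photographers", l7) ] i
          = [ ("directors", l1 ++ [i]), ("producers", l2), ("screenwriters", l3), ("story", l4),
              ("editors", l5), ("composers", l6), ("photographers", l7) ] := by
          simp [pvStep, hj, pvDispatch, PySem.Dict.get?_mk_cons]
        rw [hstep, ih]
        simp [pvJob?, hj]
      · by_cases h2 : j = "Producer"
        · subst h2
          have hstep : pvStep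
            [ ("directors", l1), ("producers", l2), ("screenwriters", l3), ("story", l4),
              ("editors", l5), ("composers", l6), ("photographers", l7) ] i
            = [ ("directors", l1), ("producers", l2 ++ [i]), ("screenwriters", l3), ("story", l4),
                ("editors", l5), ("composers", l6), ("photographers", l7) ] := by
            simp [pvStep, hj, pvDispatch, PySem.Dict.get?_mk_cons]
          rw [hstep, ih]
          simp [pvJob?, hj]
        · by_cases h3 : j = "Screenplay"
          · subst h3
            have hstep : pvStep
              [ ("directors", l1), ("producers", l2), ("screenwriters", l3), ("story", l4),
                ("editors", l5), ("composers", l6), ("photographers", l7) ] i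
              = [ ("directors", l1), ("producers", l2), ("screenwriters", l3 ++ [i]), ("story", l4),
                  ("editors", l5), ("composers", l6), ("photographers", l7) ] := by
              simp [pvStep, hj, pvDispatch, PySem.Dict.get?_mk_cons]
            rw [hstep, ih]
            simp [pvJob?, hj]
          · by_cases h4 : j = "Story"
            · subst h4
              have hstep : pvStep
                [ ("directors", l1), ("producers", l2), ("screenwriters", l3), ("story", l4),
                  ("editors", l5), ("composers", l6), ("photographers", l7) ] i
                = [ ("directors", l1), ("producers", l2), ("screenwriters", l3), ("story", l4 ++ [i]),
                    ("editors", l5), ("composers", l6), ("photographers", l7) ] := by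
                simp [pvStep, hj, pvDispatch, PySem.Dict.get?_mk_cons]
              rw [hstep, ih]
              simp [pvJob?, hj]
            · by_cases h5 : j = "Editor"
              · subst h5
                have hstep : pvStep
                  [ ("directors", l1), ("producers", l2), ("screenwriters", l3), ("story", l4),
                    ("editors", l5), ("composers", l6), ("photographers", l7) ] i
                  = [ ("directors", l1), ("producers", l2), ("screenwriters", l3), ("story", l4),
                      ("editors", l5 ++ [i]), ("composers", l6), ("photographers", l7) ] := by
                  simp [pvStep, hj, pvDispatch, PySem.Dict.get?_mk_cons]
                rw [hstep, ih]
                simp [pvJob?, hj]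
              · by_cases h6 : j = "Original Music Composer"
                · subst h6
                  have hstep : pvStep
                    [ ("directors", l1), ("producers", l2), ("screenwriters", l3), ("story", l4),
                      ("editors", l5), ("composers", l6), ("photographers", l7) ] i
                    = [ ("directors", l1), ("producers", l2), ("screenwriters", l3), ("story", l4),
                        ("editors", l5), ("composers", l6 ++ [i]), ("photographers", l7) ] := by
                    simp [pvStep, hj, pvDispatch, PySem.Dict.get?_mk_cons]
                  rw [hstep, ih]
                  simp [pvJob?, hj]
                · by_cases h7 : j = "Director of Photography"
                  · subst h7
                    have hstep : pvStep
                      [ ("directors", l1), ("producers", l2), ("screenwriters", l3), ("story", l4),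
                        ("editors", l5), ("composers", l6), ("photographers", l7) ] i
                      = [ ("directors", l1), ("producers", l2), ("screenwriters", l3), ("story", l4),
                          ("editors", l5), ("composers", l6), ("photographers", l7 ++ [i]) ] := by
                      simp [pvStep, hj, pvDispatch, PySem.Dict.get?_mk_cons]
                    rw [hstep, ih]
                    simp [pvJob?, hj]
                  · have hd : (PySem.Dict.mk pvDispatch).get? j = none := by
                      simp [pvDispatch, PySem.Dict.get?,
                            Ne.symm h1, Ne.symm h2, Ne.symm h3, Ne.symm h4, Ne.symm h5, Ne.symm h6, Ne.symm h7]
                    have hstep : pvStep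
                      [ ("directors", l1), ("producers", l2), ("screenwriters", l3), ("story", l4),
                        ("editors", l5), ("composers", l6), ("photographers", l7) ] i
                      = [ ("directors", l1), ("producers", l2), ("screenwriters", l3), ("story", l4),
                          ("editors", l5), ("composers", l6), ("photographers", l7) ] := by
                      simp [pvStep, hj, hd]
                    rw [hstep, ih]
                    simp [pvJob?, hj, h1, h2, h3, h4, h5, h6, h7]

-- ===== VERDICT (by name: the statement is the Claim_ definition above) =====
theorem parse_top_credits_spec : Claim_equal_parse_top_credits := by
  intro credits _ _
  unfold Spec_parse_top_credits parse_top_credits parse_top_credits_alt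
  rw [pvFold_char]
  simp
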